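-- pv_equiv track=rewrite | github.com/clover3/desk | src/chair/tokens_util.py | get_resolved_tokens_from_masked_tokens_and_ids
-- ===== SOURCE A (Python) =====
-- def get_resolved_tokens_from_masked_tokens_and_ids(tokens, answer_mask_tokens, masked_positions):
--     for i, t in enumerate(tokens):
--         if t == "[PAD]":
--             break
--         if i in masked_positions:
--             i_idx = masked_positions.index(i)
--             tokens[i] = "[{}:{}]".format(i_idx, answer_mask_tokens[i_idx])
--
--     return tokens
-- ===== SOURCE B (Python) =====
-- def get_resolved_tokens_from_masked_tokens_and_ids(tokens, answer_mask_tokens, masked_positions):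
--     # Mask-driven: one pass over masked_positions (not over tokens); a `seen`
--     # set makes the FIRST occurrence of a duplicated position win, matching
--     # A's masked_positions.index(i). Mutates `tokens` in place, like A.
--     try:
--         pad = tokens.index("[PAD]")
--     except ValueError:
--         pad = len(tokens)
--     seen = set()
--     for i_idx, pos in enumerate(masked_positions):
--         if 0 <= pos < pad and pos not in seen:
--             seen.add(pos)
--             tokens[pos] = "[{}:{}]".format(i_idx, answer_mask_tokens[i_idx])
--     return tokens
-- ===== Notes on version B (the rewrite author's own statement) =====
-- stated objective: faster
-- what changed: A drives the loop over the token list and runs 'i in masked_positions' plus 'masked_positions.index(i)' inner scans per token; B drives the loop over masked_positions itself: it finds the PAD boundary once, then a single forward pass over masked_positions with a 'seen' set (first occurrence of a duplicate position wins, matching A's .index) writes each in-range position directly.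
import Mathlib
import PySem

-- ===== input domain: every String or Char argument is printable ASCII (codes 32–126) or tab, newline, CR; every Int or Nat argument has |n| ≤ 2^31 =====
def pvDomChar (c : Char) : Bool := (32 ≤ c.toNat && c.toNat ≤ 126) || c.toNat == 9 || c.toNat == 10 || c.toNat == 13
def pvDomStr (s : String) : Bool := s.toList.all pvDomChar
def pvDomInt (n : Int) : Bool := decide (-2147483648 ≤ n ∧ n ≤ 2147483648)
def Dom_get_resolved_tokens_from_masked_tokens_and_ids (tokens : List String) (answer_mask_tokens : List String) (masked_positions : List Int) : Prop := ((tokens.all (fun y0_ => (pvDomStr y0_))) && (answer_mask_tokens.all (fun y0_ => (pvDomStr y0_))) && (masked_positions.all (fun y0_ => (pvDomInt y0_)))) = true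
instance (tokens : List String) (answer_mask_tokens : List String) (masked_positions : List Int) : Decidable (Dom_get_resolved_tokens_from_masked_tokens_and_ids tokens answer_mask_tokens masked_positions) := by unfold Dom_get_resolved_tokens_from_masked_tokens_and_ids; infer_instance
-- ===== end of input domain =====

-- B replaces A's token-driven scan with per-token membership/index searches over masked_positions
-- by one PAD-boundary lookup and a single mask-driven pass with a `seen` set; return values proved
-- equal (both mutate `tokens` in place in Python; equivalence here is about the returned list).


-- ===== PORT A =====
-- "[{}:{}]".format(i_idx, answer_mask_tokens[i_idx])  (i_idx a nonnegative Python int;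
-- the IndexError on a too-short answer_mask_tokens is totalized by getD and excluded by Pre_)
def pvFmtA (answer_mask_tokens : List String) (i_idx : Nat) : String :=
  "[" ++ PySem.Int.toStr (i_idx : Int) ++ ":" ++ answer_mask_tokens.getD i_idx "" ++ "]"

-- the `for i, t in enumerate(tokens)` loop over the in-place mutated list, with its `break`
def pvAGo (answer_mask_tokens : List String) (masked_positions : List Int) (toks : List String) (i : Nat) : List String :=
  if h : i < toks.length then
    if toks[i] = "[PAD]" then toks
    else
      pvAGo answer_mask_tokens masked_positions
        (if (i : Int) ∈ masked_positions then
          toks.set i (pvFmtA answer_mask_tokens ((PySem.List.index? masked_positions (i : Int)).getD 0))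
        else toks)
        (i + 1)
  else toks
termination_by toks.length - i
decreasing_by split <;> first | (simp only [List.length_set]; omega) | omega

def get_resolved_tokens_from_masked_tokens_and_ids (tokens : List String) (answer_mask_tokens : List String) (masked_positions : List Int) : List String :=
  pvAGo answer_mask_tokens masked_positions tokens 0

-- ===== PORT B =====
def pvFmtB (answer_mask_tokens : List String) (i : Int) : String :=
  "[" ++ PySem.Int.toStr i ++ ":" ++ answer_mask_tokens.getD i.toNat "" ++ "]"

-- the body of B's `for i_idx, pos in enumerate(masked_positions)` loop: state = (tokens, seen)
def pvBStep (answer_mask_tokens : List String) (pad : Int) (st : List String × PySem.Set Int) (q : Int × Int) : List String × PySem.Set Int :=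
  if 0 ≤ q.2 ∧ q.2 < pad ∧ ¬ q.2 ∈ st.2 then
    (PySem.List.pySetD st.1 q.2 (pvFmtB answer_mask_tokens q.1), PySem.Set.add st.2 q.2)
  else st

def get_resolved_tokens_from_masked_tokens_and_ids_alt (tokens : List String) (answer_mask_tokens : List String) (masked_positions : List Int) : List String :=
  let pad : Int := (((PySem.List.index? tokens "[PAD]").getD tokens.length : Nat) : Int)
  ((PySem.List.enumerate masked_positions 0).foldl (pvBStep answer_mask_tokens pad)
    (tokens, PySem.Set.empty)).1

-- ===== PRECONDITION & SPEC =====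
-- Pre_ excludes exactly the inputs where the Python A raises IndexError: some masked position before
-- the PAD boundary whose first-occurrence index in masked_positions is ≥ len(answer_mask_tokens).
def Pre_get_resolved_tokens_from_masked_tokens_and_ids (tokens : List String) (answer_mask_tokens : List String) (masked_positions : List Int) : Prop :=
  ∀ p ∈ masked_positions,
    (0 ≤ p ∧ p < (((PySem.List.index? tokens "[PAD]").getD tokens.length : Nat) : Int)) →
      (PySem.List.index? masked_positions p).getD 0 < answer_mask_tokens.length
instance (tokens : List String) (answer_mask_tokens : List String) (masked_positions : List Int) : Decidable (Pre_get_resolved_tokens_from_masked_tokens_and_ids tokens answer_mask_tokens masked_positions) := by unfold Pre_get_resolved_tokens_from_masked_tokens_and_ids; infer_instance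

def pvWitness_get_resolved_tokens_from_masked_tokens_and_ids : List String × List String × List Int :=
  (["a", "b", "[PAD]", "c"], ["X"], [1, 3])

def Spec_get_resolved_tokens_from_masked_tokens_and_ids (tokens : List String) (answer_mask_tokens : List String) (masked_positions : List Int) (out : List String) : Prop := out = get_resolved_tokens_from_masked_tokens_and_ids_alt tokens answer_mask_tokens masked_positions
instance (tokens : List String) (answer_mask_tokens : List String) (masked_positions : List Int) (out : List String) : Decidable (Spec_get_resolved_tokens_from_masked_tokens_and_ids tokens answer_mask_tokens masked_positions out) := by unfold Spec_get_resolved_tokens_from_masked_tokens_and_ids; infer_instance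

-- ===== CLAIM (what is proved, stated in full; the proofs are below) =====
def Claim_equal_get_resolved_tokens_from_masked_tokens_and_ids : Prop := ∀ (tokens : List String) (answer_mask_tokens : List String) (masked_positions : List Int), Dom_get_resolved_tokens_from_masked_tokens_and_ids tokens answer_mask_tokens masked_positions → Pre_get_resolved_tokens_from_masked_tokens_and_ids tokens answer_mask_tokens masked_positions → Spec_get_resolved_tokens_from_masked_tokens_and_ids tokens answer_mask_tokens masked_positions (get_resolved_tokens_from_masked_tokens_and_ids tokens answer_mask_tokens masked_positions)

-- ===== LEMMAS AND PROOFS =====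

-- first index ≥ i of "[PAD]" in toks (toks.length if none): A's break point, as a plain function
def pvPadFrom (toks : List String) (i : Nat) : Nat :=
  if h : i < toks.length then
    if toks[i] = "[PAD]" then i else pvPadFrom toks (i + 1)
  else i
termination_by toks.length - i

lemma pvPadFrom_ge (toks : List String) (i : Nat) : i ≤ pvPadFrom toks i := by
  fun_induction pvPadFrom <;> omega

lemma pvPadFrom_le (toks : List String) (i : Nat) (h : i ≤ toks.length) :
    pvPadFrom toks i ≤ toks.length := by
  fun_induction pvPadFrom <;> omega

-- writing below the current position does not move the break point
lemma pvPadFrom_set (toks : List String) (m : Nat) (v : String) (i : Nat) (h : m < i) :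
    pvPadFrom (toks.set m v) i = pvPadFrom toks i := by
  fun_induction pvPadFrom toks i with
  | case1 k hk hpad =>
    have hne : m ≠ k := by omega
    rw [pvPadFrom]
    simp [hk, List.getElem_set_ne hne, hpad]
  | case2 k hk hpad ih =>
    rw [pvPadFrom]
    have hne : m ≠ k := by omega
    simp only [List.length_set]
    rw [dif_pos hk]
    rw [List.getElem_set_ne hne, if_neg hpad]
    exact ih (by omega)
  | case3 k hk =>
    rw [pvPadFrom]
    simp [List.length_set, hk]

lemma pvPadFrom_lt_ne (toks : List String) (i : Nat) :
    ∀ j, i ≤ j → j < pvPadFrom toks i → ∀ (hj : j < toks.length), toks[j] ≠ "[PAD]" := by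
  fun_induction pvPadFrom toks i with
  | case1 k hk hpad => omega
  | case2 k hk hpad ih =>
    intro j h1 h2 hj
    rcases Nat.eq_or_lt_of_le h1 with rfl | h1
    · exact hpad
    · exact ih j h1 h2 hj
  | case3 k hk => omega

lemma pvPadFrom_pad (toks : List String) (i : Nat)
    (h : pvPadFrom toks i < toks.length) : toks[pvPadFrom toks i] = "[PAD]" := by
  fun_induction pvPadFrom toks i with
  | case1 k hk hpad => exact hpad
  | case2 k hk hpad ih => exact ih h
  | case3 k hk => omega

-- A's break point is B's pad = tokens.index("[PAD]") (defaulting to len(tokens))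
lemma pvPad_eq (toks : List String) :
    pvPadFrom toks 0 = ((PySem.List.index? toks "[PAD]").getD toks.length) := by
  cases hidx : PySem.List.index? toks "[PAD]" with
  | none =>
    have hnm : "[PAD]" ∉ toks := (PySem.List.index?_eq_none_iff _ _).mp hidx
    have hle := pvPadFrom_le toks 0 (by omega)
    rcases Nat.eq_or_lt_of_le hle with heq | hlt
    · simpa using heq
    · exact absurd (pvPadFrom_pad toks 0 hlt ▸ List.getElem_mem hlt) hnm
  | some k =>
    obtain ⟨hk, hkm, hbef⟩ := PySem.List.getElem_of_index?_eq_some hidx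
    simp only [Option.getD_some]
    by_contra hne
    rcases Nat.lt_or_ge (pvPadFrom toks 0) k with h1 | h1
    · have hlt : pvPadFrom toks 0 < toks.length := by omega
      exact hbef _ h1 (pvPadFrom_pad toks 0 hlt)
    · exact pvPadFrom_lt_ne toks 0 k (by omega) (by omega) hk hkm

-- pointwise description of A's loop result
lemma pvAGo_getElem? (ans : List String) (mp : List Int) (toks : List String) (i : Nat) (j : Nat) :
    (pvAGo ans mp toks i)[j]? =
      if i ≤ j ∧ j < pvPadFrom toks i ∧ (j : Int) ∈ mp then
        some (pvFmtA ans ((PySem.List.index? mp (j : Int)).getD 0))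
      else toks[j]? := by
  fun_induction pvAGo ans mp toks i with
  | case1 toks i hk hpad =>
    have hp : pvPadFrom toks i = i := by rw [pvPadFrom]; simp [hk, hpad]
    rw [hp, if_neg (by omega)]
  | case2 toks i hk hpad ih =>
    have hpf : pvPadFrom toks i = pvPadFrom toks (i + 1) := by
      rw [pvPadFrom]; simp [hk, hpad]
    simp only [dite_eq_ite] at ih
    rw [ih]
    set toks' := (if (i : Int) ∈ mp then
        toks.set i (pvFmtA ans ((PySem.List.index? mp (i : Int)).getD 0)) else toks) with htoks'
    have hpf' : pvPadFrom toks' (i + 1) = pvPadFrom toks (i + 1) := by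
      rw [htoks']; split
      · exact pvPadFrom_set toks i _ (i + 1) (by omega)
      · rfl
    rw [hpf', ← hpf]
    by_cases hij : j = i
    · subst hij
      rw [if_neg (by omega)]
      by_cases hm : (j : Int) ∈ mp
      · have : j < pvPadFrom toks j := by
          have := pvPadFrom_ge toks (j + 1); omega
        rw [if_pos ⟨le_refl j, this, hm⟩, htoks', if_pos hm,
          List.getElem?_set_self (by omega)]
      · rw [if_neg (by simp [hm]), htoks', if_neg hm]
    · have htj : toks'[j]? = toks[j]? := by
        rw [htoks']; split
        · exact List.getElem?_set_ne (by omega)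
        · rfl
      have hiff : (i + 1 ≤ j) ↔ (i ≤ j) := by omega
      rw [htj]
      simp only [hiff]
  | case3 toks i hk =>
    have hp : pvPadFrom toks i = i := by rw [pvPadFrom]; simp [hk]
    rw [hp, if_neg (by omega)]

-- pointwise description of B's mask-driven loop: position j gets the format of the FIRST
-- occurrence index of j in the remaining list (offset s), unless j is already in `seen`
lemma pvBLoop_getElem? (ans : List String) (pad : Int) (mp : List Int) (s : Int)
    (T : List String) (S : PySem.Set Int) (hT : pad ≤ (T.length : Int)) (j : Nat) :
    ((PySem.List.enumerate mp s).foldl (pvBStep ans pad) (T, S)).1[j]? =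
      if (j : Int) < pad ∧ (j : Int) ∈ mp ∧ ¬ (j : Int) ∈ S then
        some (pvFmtB ans (s + (((PySem.List.index? mp (j : Int)).getD 0 : Nat) : Int)))
      else T[j]? := by
  induction mp generalizing s T S with
  | nil => simp [PySem.List.enumerate_nil]
  | cons x xs ih =>
    rw [PySem.List.enumerate_cons]
    simp only [List.foldl_cons]
    by_cases hx : 0 ≤ x ∧ x < pad ∧ ¬ x ∈ S
    · have hstep : pvBStep ans pad (T, S) (s, x)
          = (T.set x.toNat (pvFmtB ans s), PySem.Set.add S x) := by
        unfold pvBStep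
        rw [if_pos hx, PySem.List.pySetD_of_nonneg T (pvFmtB ans s) hx.1]
      rw [hstep, ih (s + 1) _ _ (by simpa using hT)]
      by_cases hjx : (j : Int) = x
      · have hjS : (j : Int) ∈ PySem.Set.add S x := by
          rw [PySem.Set.mem_add]; exact Or.inr hjx
        rw [if_neg (by simp [hjS])]
        have hjn : x.toNat = j := by omega
        have hjlen : j < T.length := by omega
        rw [hjn, List.getElem?_set_self hjlen]
        rw [if_pos ⟨by omega, by rw [hjx]; exact List.mem_cons_self, by rw [hjx]; exact hx.2.2⟩]
        rw [hjx, PySem.List.index?_cons_self]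
        simp
      · have hSiff : ((j : Int) ∈ PySem.Set.add S x) ↔ ((j : Int) ∈ S) := by
          rw [PySem.Set.mem_add]; simp [hjx]
        rw [List.getElem?_set_ne (by omega)]
        rw [PySem.List.index?_cons_of_ne xs (fun h => hjx h.symm)]
        cases hidx : PySem.List.index? xs (j : Int) with
        | none =>
          have hnm : (j : Int) ∉ xs := (PySem.List.index?_eq_none_iff _ _).mp hidx
          rw [if_neg (by simp [hSiff, hnm]), if_neg (by simp [hnm, hjx])]
        | some k =>
          have hm : (j : Int) ∈ xs := by
            obtain ⟨hk, hkm, -⟩ := PySem.List.getElem_of_index?_eq_some hidx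
            exact hkm ▸ List.getElem_mem hk
          by_cases hcond : (j : Int) < pad ∧ ¬ (j : Int) ∈ S
          · rw [if_pos ⟨hcond.1, hm, by rw [hSiff]; exact hcond.2⟩,
              if_pos ⟨hcond.1, List.mem_cons_of_mem _ hm, hcond.2⟩]
            simp only [Option.map_some, Option.getD_some]
            have harg : s + 1 + ((k : Nat) : Int) = s + (((k + 1 : Nat) : Nat) : Int) := by
              push_cast; ring
            rw [harg]
          · rw [if_neg (by rw [hSiff]; tauto), if_neg (by tauto)]
    · have hstep : pvBStep ans pad (T, S) (s, x) = (T, S) := by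
        unfold pvBStep
        rw [if_neg hx]
      rw [hstep, ih (s + 1) T S hT]
      by_cases hjx : (j : Int) = x
      · have hxge : 0 ≤ x := by omega
        have hbad : ¬ (x < pad ∧ ¬ x ∈ S) := by tauto
        rw [if_neg (by rw [hjx]; tauto), if_neg (by rw [hjx]; tauto)]
      · rw [PySem.List.index?_cons_of_ne xs (fun h => hjx h.symm)]
        cases hidx : PySem.List.index? xs (j : Int) with
        | none =>
          have hnm : (j : Int) ∉ xs := (PySem.List.index?_eq_none_iff _ _).mp hidx
          rw [if_neg (by simp [hnm]), if_neg (by simp [hnm, hjx])]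
        | some k =>
          have hm : (j : Int) ∈ xs := by
            obtain ⟨hk, hkm, -⟩ := PySem.List.getElem_of_index?_eq_some hidx
            exact hkm ▸ List.getElem_mem hk
          by_cases hcond : (j : Int) < pad ∧ ¬ (j : Int) ∈ S
          · rw [if_pos ⟨hcond.1, hm, hcond.2⟩,
              if_pos ⟨hcond.1, List.mem_cons_of_mem _ hm, hcond.2⟩]
            simp only [Option.map_some, Option.getD_some]
            have harg : s + 1 + ((k : Nat) : Int) = s + (((k + 1 : Nat) : Nat) : Int) := by
              push_cast; ring
            rw [harg]
          · rw [if_neg (by tauto), if_neg (by tauto)]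

-- ===== VERDICT (by name: the statement is the Claim_ definition above) =====
theorem get_resolved_tokens_from_masked_tokens_and_ids_spec : Claim_equal_get_resolved_tokens_from_masked_tokens_and_ids := by
  intro toks ans mp _hdom _hpre
  unfold Spec_get_resolved_tokens_from_masked_tokens_and_ids
    get_resolved_tokens_from_masked_tokens_and_ids
    get_resolved_tokens_from_masked_tokens_and_ids_alt
  set pad : Int := (((PySem.List.index? toks "[PAD]").getD toks.length : Nat) : Int) with hpad
  have hTle : pad ≤ (toks.length : Int) := by
    rw [hpad]
    cases hidx : PySem.List.index? toks "[PAD]" with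
    | none => simp
    | some k =>
      have := (PySem.List.getElem_of_index?_eq_some hidx).1
      simp; omega
  apply List.ext_getElem?
  intro j
  rw [pvAGo_getElem?, pvBLoop_getElem? ans pad mp 0 toks PySem.Set.empty hTle j]
  rw [pvPad_eq]
  by_cases hc : j < (PySem.List.index? toks "[PAD]").getD toks.length ∧ (j : Int) ∈ mp
  · rw [if_pos ⟨by omega, hc.1, hc.2⟩,
      if_pos ⟨by rw [hpad]; exact_mod_cast hc.1, hc.2, by simp [PySem.Set.empty]⟩]
    unfold pvFmtA pvFmtB
    simp
  · rw [if_neg (by tauto), if_neg (by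
      rw [hpad]
      rintro ⟨h1, h2, _⟩
      exact hc ⟨by exact_mod_cast h1, h2⟩)]
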